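-- pv_equiv track=rewrite | github.com/parvyyy/leetcode | daily/02/lexicographically_largest_valid_sequence.py | WithBacktracking
-- ===== SOURCE A (Python) =====
-- def WithBacktracking(n: int) -> list[int]:
--     visited = [0 for _ in range(2 * n - 1)]
--
--     if n == 1:
--         return [1]
--
--     def addLowerSequence(v: int):
--         if v == 1:
--             idx = visited.index(0)
--             visited[idx] = 1
--
--             return True
--
--         for i in range(2 * n - 1):
--             # Pair will exceed bounds
--             if i + v >= 2 * n - 1:
--                 continue
--
--             # Both indices aren't valid for v to be 'v' apart
--             # from one another.
--             if visited[i] or visited[i + v]: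
--                 continue
--
--             visited[i] = visited[i + v] = v
--             if addLowerSequence(v - 1):
--                 return True
--
--             visited[i] = visited[i + v] = 0
--
--         return False
--
--     # The lexographically largest seq. will always start with 'n'. This
--     # reduces the # of iterations by a factor of 'n'.
--     visited[0] = visited[n] = n
--
--     if addLowerSequence(n - 1):
--         return visited
-- ===== SOURCE B (Python) =====
-- def WithBacktracking(n: int) -> list[int]:
--     # Iterative explicit-stack version of the same value-major greedy search:
--     # place n at 0, then v = n-1, n-2, ..., 2 each at the leftmost admissible
--     # position, backtracking via an explicit stack; finally put 1 in the hole.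
--     if n == 1:
--         return [1]
--     m = 2 * n - 1
--     visited = [0] * m
--     visited[0] = visited[n] = n
--     v, i, stack = n - 1, 0, []
--     while v >= 2:
--         if i + v < m and visited[i] == 0 and visited[i + v] == 0:
--             visited[i] = visited[i + v] = v
--             stack.append((v, i))
--             v, i = v - 1, 0
--         elif i + v < m:
--             i += 1
--         else:
--             # positions for v exhausted: undo the most recent placement
--             v, i = stack.pop()
--             visited[i] = visited[i + v] = 0
--             i += 1
--     visited[visited.index(0)] = 1
--     return visited
-- ===== Notes on version B (the rewrite author's own statement) =====
-- stated objective: alternative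
-- what changed: Replaces the recursive backtracking (one recursion level per value, restoring the shared list on failure) by an iterative state machine with an explicit undo stack that advances, pushes and pops placements in a single loop.
import Mathlib
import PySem

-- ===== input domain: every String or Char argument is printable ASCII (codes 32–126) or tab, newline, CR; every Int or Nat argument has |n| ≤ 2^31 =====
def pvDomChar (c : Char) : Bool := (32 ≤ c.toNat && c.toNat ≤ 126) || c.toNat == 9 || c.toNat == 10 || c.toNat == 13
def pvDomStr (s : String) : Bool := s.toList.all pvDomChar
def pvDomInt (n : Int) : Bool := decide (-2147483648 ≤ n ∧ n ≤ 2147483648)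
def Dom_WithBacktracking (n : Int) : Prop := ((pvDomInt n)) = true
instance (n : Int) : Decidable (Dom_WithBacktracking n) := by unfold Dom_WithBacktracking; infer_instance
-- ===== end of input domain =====

-- B rewrites A's recursive backtracking as an iterative machine with an explicit
-- undo stack; same search order, hence the same returned sequence (objective: alternative).

-- ===== PORT A =====
-- Python: 'idx = visited.index(0); visited[idx] = 1' (a missing 0 would raise
-- ValueError in Python; that situation is unreachable, we return vis unchanged).
def pvPlaceOneA (vis : List Int) : List Int :=
  match PySem.List.index? vis 0 with
  | some idx => vis.set idx 1
  | none => vis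

mutual
-- 'def addLowerSequence(v)': the Bool result together with the threaded 'visited'
-- (Python mutates it in place).  v is carried as a Nat: Python only calls it with
-- v ≥ 1 (the v = 0 case is unreachable; it returns (false, vis) there).
def pvARec (m : Nat) : Nat → List Int → Bool × List Int
  | 0, vis => (false, vis)
  | 1, vis => (true, pvPlaceOneA vis)
  | v + 2, vis => pvATry m v (List.range m) vis
termination_by v vis => (v, m + 1)
decreasing_by exact Prod.Lex.right _ (by simp)

-- the 'for i in range(2 * n - 1)' loop of addLowerSequence for value v + 2, over
-- the remaining positions.  The two 'continue' guards are kept in Python's order;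
-- 'visited[i] or visited[i + v]' (truthiness = nonzero) is written as the negation
-- of 'both cells are 0'; the pyGet? calls are in bounds whenever i + (v+2) < m and
-- vis has length m, which holds at every actual call.
def pvATry (m v : Nat) : List Nat → List Int → Bool × List Int
  | [], vis => (false, vis)
  | i :: rest, vis =>
    if m ≤ i + (v + 2) then pvATry m v rest vis
    else if PySem.List.pyGet? vis (i : Int) = some 0 ∧ PySem.List.pyGet? vis ((i + (v + 2) : Nat) : Int) = some 0 then
      match pvARec m (v + 1) ((vis.set i ((v + 2 : Nat) : Int)).set (i + (v + 2)) ((v + 2 : Nat) : Int)) with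
      | (true, w) => (true, w)
      | (false, w) => pvATry m v rest ((w.set i 0).set (i + (v + 2)) 0)
    else pvATry m v rest vis
termination_by l vis => (v + 2, l.length)
decreasing_by
  · exact Prod.Lex.right _ (by simp)
  · exact Prod.Lex.left _ _ (by omega)
  · exact Prod.Lex.right _ (by simp)
  · exact Prod.Lex.right _ (by simp)
end

def WithBacktracking (n : Int) : List Int :=
  -- visited = [0 for _ in range(2 * n - 1)]
  let visited := List.replicate (2 * n - 1).toNat 0
  if n == 1 then [1]
  else
    -- visited[0] = visited[n] = n
    let visited := (visited.set 0 n).set n.toNat n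
    match pvARec (2 * n - 1).toNat (n - 1).toNat visited with
    | (true, w) => w
    | (false, _) => []  -- Python falls off and returns None here; unreachable for n ≥ 1

-- ===== PORT B =====
-- 'visited[visited.index(0)] = 1'
def pvPlaceOneB (vis : List Int) : List Int :=
  match PySem.List.index? vis 0 with
  | some idx => vis.set idx 1
  | none => vis

-- termination measure for the machine: remaining-work weight of the current
-- position plus the resume weights of everything on the undo stack
def pvMu (m v i : Nat) (stack : List (Nat × Nat)) : Nat :=
  (m - i + 1) * (m + 2) ^ v + (stack.map (fun p => (m - (p.2 + 1) + 1) * (m + 2) ^ p.1)).sum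

theorem pvMu_push (m w i : Nat) (stack : List (Nat × Nat)) (h : i + (w + 2) < m) :
    pvMu m (w + 1) 0 ((w + 2, i) :: stack) < pvMu m (w + 2) i stack := by
  simp only [pvMu, List.map_cons, List.sum_cons]
  have hp : 0 < (m + 2) ^ (w + 1) := Nat.pow_pos (by omega)
  have h1 : (m - 0 + 1) * (m + 2) ^ (w + 1) < (m + 2) ^ (w + 2) := by
    have he : (m + 2) ^ (w + 2) = (m + 2) * (m + 2) ^ (w + 1) := by ring
    rw [he]
    exact Nat.mul_lt_mul_of_lt_of_le (by omega) le_rfl hp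
  have h2 : (m - (i + 1) + 1) * (m + 2) ^ (w + 2) + (m + 2) ^ (w + 2)
      = (m - i + 1) * (m + 2) ^ (w + 2) := by
    have he : m - (i + 1) + 1 + 1 = m - i + 1 := by omega
    calc (m - (i + 1) + 1) * (m + 2) ^ (w + 2) + (m + 2) ^ (w + 2)
        = (m - (i + 1) + 1 + 1) * (m + 2) ^ (w + 2) := by ring
      _ = (m - i + 1) * (m + 2) ^ (w + 2) := by rw [he]
  omega

theorem pvMu_advance (m w i : Nat) (stack : List (Nat × Nat)) (h : i + (w + 2) < m) :
    pvMu m (w + 2) (i + 1) stack < pvMu m (w + 2) i stack := by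
  simp only [pvMu]
  have hp : 0 < (m + 2) ^ (w + 2) := Nat.pow_pos (by omega)
  have hlt : (m - (i + 1) + 1) * (m + 2) ^ (w + 2) < (m - i + 1) * (m + 2) ^ (w + 2) :=
    Nat.mul_lt_mul_of_lt_of_le (by omega) le_rfl hp
  omega

theorem pvMu_pop (m w i v' i' : Nat) (rest : List (Nat × Nat)) :
    pvMu m v' (i' + 1) rest < pvMu m (w + 2) i ((v', i') :: rest) := by
  simp only [pvMu, List.map_cons, List.sum_cons]
  have hp : 0 < (m - i + 1) * (m + 2) ^ (w + 2) :=
    Nat.mul_pos (by omega) (Nat.pow_pos (by omega))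
  omega

-- the while-loop of B: state = (visited, v, i, undo stack); v < 2 means the loop
-- has finished (then 1 is placed into the remaining hole); 'none' is the
-- unreachable 'stack.pop() from an empty stack' (an IndexError in Python).
def pvBLoop (m : Nat) (vis : List Int) (v i : Nat) (stack : List (Nat × Nat)) : Option (List Int) :=
  match v with
  | 0 => some (pvPlaceOneB vis)
  | 1 => some (pvPlaceOneB vis)
  | w + 2 =>
    if h1 : i + (w + 2) < m ∧ PySem.List.pyGet? vis (i : Int) = some 0 ∧ PySem.List.pyGet? vis ((i + (w + 2) : Nat) : Int) = some 0 then
      pvBLoop m ((vis.set i ((w + 2 : Nat) : Int)).set (i + (w + 2)) ((w + 2 : Nat) : Int)) (w + 1) 0 ((w + 2, i) :: stack)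
    else if h2 : i + (w + 2) < m then
      pvBLoop m vis (w + 2) (i + 1) stack
    else
      match stack with
      | [] => none
      | (v', i') :: rest => pvBLoop m ((vis.set i' 0).set (i' + v') 0) v' (i' + 1) rest
termination_by pvMu m v i stack
decreasing_by
  · exact pvMu_push m w i stack h1.1
  · exact pvMu_advance m w i stack h2
  · exact pvMu_pop m w i v' i' rest

def WithBacktracking_alt (n : Int) : List Int :=
  if n == 1 then [1]
  else
    let m := (2 * n - 1).toNat
    let visited := ((List.replicate m 0).set 0 n).set n.toNat n
    match pvBLoop m visited (n - 1).toNat 0 [] with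
    | some r => r
    | none => []  -- Python would raise IndexError (pop from empty stack); unreachable for n ≥ 1

-- ===== PRECONDITION & SPEC =====
-- For n ≤ 0 the Python A raises IndexError ('visited[0] = ...' indexes an empty list).
def Pre_WithBacktracking (n : Int) : Prop := 1 ≤ n
instance (n : Int) : Decidable (Pre_WithBacktracking n) := by unfold Pre_WithBacktracking; infer_instance
def pvWitness_WithBacktracking : Int := 5
def Spec_WithBacktracking (n : Int) (out : List Int) : Prop := out = WithBacktracking_alt n
instance (n : Int) (out : List Int) : Decidable (Spec_WithBacktracking n out) := by unfold Spec_WithBacktracking; infer_instance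

-- ===== CLAIM (what is proved, stated in full; the proofs are below) =====
def Claim_equal_WithBacktracking : Prop := ∀ (n : Int), Dom_WithBacktracking n → Pre_WithBacktracking n → Spec_WithBacktracking n (WithBacktracking n)

-- ===== LEMMAS AND PROOFS =====

-- plain unfolding equations for the well-founded definitions
theorem pvARec_one (m : Nat) (vis : List Int) : pvARec m 1 vis = (true, pvPlaceOneA vis) := by
  rw [pvARec]
theorem pvARec_step (m v : Nat) (vis : List Int) :
    pvARec m (v + 2) vis = pvATry m v (List.range m) vis := by
  rw [pvARec]
theorem pvATry_nil (m v : Nat) (vis : List Int) : pvATry m v [] vis = (false, vis) := by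
  rw [pvATry]
theorem pvATry_cons (m v i : Nat) (rest : List Nat) (vis : List Int) :
    pvATry m v (i :: rest) vis =
      if m ≤ i + (v + 2) then pvATry m v rest vis
      else if PySem.List.pyGet? vis (i : Int) = some 0 ∧ PySem.List.pyGet? vis ((i + (v + 2) : Nat) : Int) = some 0 then
        match pvARec m (v + 1) ((vis.set i ((v + 2 : Nat) : Int)).set (i + (v + 2)) ((v + 2 : Nat) : Int)) with
        | (true, w) => (true, w)
        | (false, w) => pvATry m v rest ((w.set i 0).set (i + (v + 2)) 0)
      else pvATry m v rest vis := by
  rw [pvATry]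
theorem pvBLoop_one (m : Nat) (vis : List Int) (i : Nat) (stack : List (Nat × Nat)) :
    pvBLoop m vis 1 i stack = some (pvPlaceOneB vis) := by
  rw [pvBLoop.eq_def]
theorem pvBLoop_step (m : Nat) (vis : List Int) (w i : Nat) (stack : List (Nat × Nat)) :
    pvBLoop m vis (w + 2) i stack =
      if _h1 : i + (w + 2) < m ∧ PySem.List.pyGet? vis (i : Int) = some 0 ∧ PySem.List.pyGet? vis ((i + (w + 2) : Nat) : Int) = some 0 then
        pvBLoop m ((vis.set i ((w + 2 : Nat) : Int)).set (i + (w + 2)) ((w + 2 : Nat) : Int)) (w + 1) 0 ((w + 2, i) :: stack)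
      else if _h2 : i + (w + 2) < m then
        pvBLoop m vis (w + 2) (i + 1) stack
      else
        match stack with
        | [] => none
        | (v', i') :: rest => pvBLoop m ((vis.set i' 0).set (i' + v') 0) v' (i' + 1) rest := by
  rw [pvBLoop.eq_def]

-- setting a cell to the value it already holds is the identity
theorem pvSet_self (l : List Int) (i : Nat) (a : Int) (h : l[i]? = some a) :
    l.set i a = l := by
  apply List.ext_getElem?
  intro j
  by_cases hj : j = i
  · subst hj; rw [List.getElem?_set_self', h]; rfl
  · rw [List.getElem?_set_ne (by omega)]

-- undoing a placement restores the board
theorem pvUnplace_place (vis : List Int) (i k : Nat) (val : Int) (hk : 0 < k)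
    (h1 : vis[i]? = some 0) (h2 : vis[i + k]? = some 0) :
    ((((vis.set i val).set (i + k) val).set i 0).set (i + k) 0) = vis := by
  rw [List.set_comm val (0 : Int) (show i + k ≠ i by omega), List.set_set, List.set_set,
    pvSet_self vis i 0 h1, pvSet_self vis (i + k) 0 h2]

-- a failing pvATry leaves the board as it found it (Python restores 'visited')
theorem pvATry_false (m : Nat) : ∀ (v : Nat) (ps : List Nat) (vis w : List Int),
    pvATry m v ps vis = (false, w) → w = vis := by
  intro v
  induction v using Nat.strong_induction_on with
  | _ v IH =>
    intro ps
    induction ps with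
    | nil =>
      intro vis w h
      rw [pvATry_nil] at h
      injection h with _ h2
      exact h2.symm
    | cons i rest IHps =>
      intro vis w h
      rw [pvATry_cons] at h
      split at h
      · exact IHps vis w h
      · split at h
        · rename_i hfree
          split at h
          · exact absurd (congrArg Prod.fst h) (by simp)
          · rename_i w' hrec
            have hw' : w' = (vis.set i ((v + 2 : Nat) : Int)).set (i + (v + 2)) ((v + 2 : Nat) : Int) := by
              match v, hrec with
              | 0, hrec =>
                rw [pvARec_one] at hrec
                exact absurd (congrArg Prod.fst hrec) (by simp)
              | u + 1, hrec =>
                rw [pvARec_step] at hrec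
                exact IH u (by omega) _ _ _ hrec
            subst hw'
            refine (IHps _ w h).trans ?_
            exact pvUnplace_place vis i (v + 2) _ (by omega)
              (by rw [← PySem.List.pyGet?_natCast]; exact hfree.1) (by rw [← PySem.List.pyGet?_natCast]; exact hfree.2)
        · exact IHps vis w h

-- once i + (v+2) ≥ m, every remaining position is skipped
theorem pvATry_skip (m v : Nat) : ∀ (k i : Nat) (vis : List Int), m ≤ i + (v + 2) →
    pvATry m v (List.range' i k) vis = (false, vis) := by
  intro k
  induction k with
  | zero => intro i vis _; rw [List.range'_zero, pvATry_nil]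
  | succ k IHk =>
    intro i vis h
    rw [List.range'_succ, pvATry_cons, if_pos h]
    exact IHk (i + 1) vis (by omega)

-- the machine simulates the recursion: running pvBLoop at value v+2 and position i
-- equals finishing A's scan over the remaining positions and, on failure, resuming
-- from the popped stack frame.
theorem pvSim (m : Nat) : ∀ (v k i : Nat) (vis : List Int) (stack : List (Nat × Nat)),
    i + k = m →
    pvBLoop m vis (v + 2) i stack =
      (match pvATry m v (List.range' i k) vis with
       | (true, w) => some w
       | (false, _) =>
          match stack with
          | [] => none
          | (v', i') :: rest => pvBLoop m ((vis.set i' 0).set (i' + v') 0) v' (i' + 1) rest) := by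
  intro v
  induction v using Nat.strong_induction_on with
  | _ v IH =>
    intro k
    induction k with
    | zero =>
      intro i vis stack hik
      rw [pvBLoop_step, List.range'_zero, pvATry_nil,
        dif_neg (fun h => absurd h.1 (by omega)), dif_neg (by omega : ¬ i + (v + 2) < m)]
    | succ k IHk =>
      intro i vis stack hik
      rw [pvBLoop_step, List.range'_succ, pvATry_cons]
      by_cases hg : i + (v + 2) < m
      · rw [if_neg (by omega : ¬ m ≤ i + (v + 2))]
        by_cases hfree : PySem.List.pyGet? vis (i : Int) = some 0 ∧ PySem.List.pyGet? vis ((i + (v + 2) : Nat) : Int) = some 0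
        · rw [dif_pos ⟨hg, hfree⟩, if_pos hfree]
          set vis' := (vis.set i ((v + 2 : Nat) : Int)).set (i + (v + 2)) ((v + 2 : Nat) : Int) with hvis'
          match v with
          | 0 =>
            rw [pvBLoop_one, pvARec_one]
            rfl
          | u + 1 =>
            rw [IH u (by omega) m 0 vis' ((u + 1 + 2, i) :: stack) (by omega), pvARec_step,
              show List.range' 0 m = List.range m from (List.range_eq_range' ).symm]
            rcases hA : pvATry m u (List.range m) vis' with ⟨b, w⟩
            cases b
            · have hw : w = vis' := pvATry_false m u _ _ _ hA
              subst hw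
              have hrestore : (vis'.set i 0).set (i + (u + 1 + 2)) 0 = vis := by
                rw [hvis']
                exact pvUnplace_place vis i (u + 1 + 2) _ (by omega)
                  (by rw [← PySem.List.pyGet?_natCast]; exact hfree.1) (by rw [← PySem.List.pyGet?_natCast]; exact hfree.2)
              show pvBLoop m ((vis'.set i 0).set (i + (u + 1 + 2)) 0) (u + 1 + 2) (i + 1) stack =
                (match pvATry m (u + 1) (List.range' (i + 1) k) ((vis'.set i 0).set (i + (u + 1 + 2)) 0) with
                 | (true, w) => some w
                 | (false, _) =>
                    match stack with
                    | [] => none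
                    | (v', i') :: rest => pvBLoop m ((vis.set i' 0).set (i' + v') 0) v' (i' + 1) rest)
              rw [hrestore]
              exact IHk (i + 1) vis stack (by omega)
            · rfl
        · rw [dif_neg (fun h => hfree h.2), dif_pos hg, if_neg hfree]
          exact IHk (i + 1) vis stack (by omega)
      · rw [dif_neg (fun h => absurd h.1 hg), dif_neg hg, if_pos (by omega : m ≤ i + (v + 2)),
          pvATry_skip m v k (i + 1) vis (by omega)]

theorem pvTop (n : Int) (hn : 2 ≤ n) :
    WithBacktracking n = WithBacktracking_alt n := by
  have hne : ¬ ((n == 1) = true) := by simp; omega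
  rw [WithBacktracking, WithBacktracking_alt]
  simp only [if_neg hne]
  cases hvn : (n - 1).toNat with
  | zero => exact absurd hvn (by omega)
  | succ v0 =>
    cases v0 with
    | zero =>
      rw [show (0:Nat) + 1 = 1 from rfl, pvARec_one, pvBLoop_one]
      rfl
    | succ u =>
      rw [show u + 1 + 1 = u + 2 from rfl, pvARec_step,
        pvSim ((2 * n - 1).toNat) u ((2 * n - 1).toNat) 0 _ [] (by omega),
        show List.range' 0 ((2 * n - 1).toNat) = List.range ((2 * n - 1).toNat) from (List.range_eq_range').symm]
      rcases hA : pvATry ((2 * n - 1).toNat) u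
        (List.range ((2 * n - 1).toNat))
        (((List.replicate ((2 * n - 1).toNat) 0).set 0 n).set n.toNat n) with ⟨b, w⟩
      cases b <;> rfl

-- ===== VERDICT (by name: the statement is the Claim_ definition above) =====
theorem WithBacktracking_spec : Claim_equal_WithBacktracking := by
  intro n _ hpre
  unfold Spec_WithBacktracking
  by_cases h1 : n = 1
  · subst h1; rfl
  · exact pvTop n (by unfold Pre_WithBacktracking at hpre; omega)
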